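-- pv_equiv track=rewrite | github.com/tipanyya06/Trim-Automation | bom_automation/app.py | _infer_material_from_row
-- ===== SOURCE A (Python) =====
-- def _infer_material_from_row(row, columns):
--     priority = [
--         "Material Name", "Material", "Material Type", "Shell Material",
--         "Fabric", "Body Fabric", "Main Material",
--     ]
--     for c in priority:
--         if c in columns:
--             v = str(row.get(c, "")).strip()
--             if v and v.lower() not in ("nan", "none"):
--                 return v
--     for c in columns:
--         if "material" in str(c).lower():
--             v = str(row.get(c, "")).strip()
--             if v and v.lower() not in ("nan", "none"):
--                 return v
--     return "N/A"
-- ===== SOURCE B (Python) =====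
-- def _valid(value):
--     v = str(value).strip()
--     return v if v and v.lower() not in ("nan", "none") else None
--
--
-- def _infer_material_from_row(row, columns):
--     priority = [
--         "Material Name", "Material", "Material Type", "Shell Material",
--         "Fabric", "Body Fabric", "Main Material",
--     ]
--     # score every candidate column, evaluate all of them, then select by minimal rank
--     scored = [(r, c) for r, c in enumerate(priority) if c in columns]
--     scored += [(len(priority) + r, c) for r, c in enumerate(columns)
--                if "material" in str(c).lower()]
--     valid = [(r, v) for r, c in scored
--              if (v := _valid(row.get(c, ""))) is not None]
--     return min(valid)[1] if valid else "N/A"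
-- ===== Notes on version B (the rewrite author's own statement) =====
-- stated objective: alternative
-- what changed: Replaces A's two early-return scans by a score-and-select algorithm: every candidate column gets a numeric rank (priority index, then len(priority)+position for 'material'-named columns), all candidates are validated eagerly into a (rank, value) list, and the answer is min() of that list (no early exit, selection by minimal rank instead of scan order).
import Mathlib
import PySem

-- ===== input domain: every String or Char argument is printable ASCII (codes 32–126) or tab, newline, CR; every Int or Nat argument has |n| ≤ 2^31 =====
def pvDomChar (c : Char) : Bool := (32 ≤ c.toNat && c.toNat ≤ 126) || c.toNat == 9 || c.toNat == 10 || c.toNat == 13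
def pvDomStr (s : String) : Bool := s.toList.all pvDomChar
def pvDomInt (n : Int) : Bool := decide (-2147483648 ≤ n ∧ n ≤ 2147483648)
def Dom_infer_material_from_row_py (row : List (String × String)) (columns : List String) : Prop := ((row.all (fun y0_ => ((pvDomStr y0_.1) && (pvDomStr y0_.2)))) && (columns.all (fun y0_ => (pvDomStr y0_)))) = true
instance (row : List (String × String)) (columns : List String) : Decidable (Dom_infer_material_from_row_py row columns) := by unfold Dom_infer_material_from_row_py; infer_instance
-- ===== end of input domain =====

-- B replaces A's two early-return scans by score-and-select: every candidate column gets a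
-- numeric rank, all candidates are validated eagerly into a (rank, value) list, and the
-- answer is min() of that list (alternative algorithm, same cost).


def pvPriority : List String :=
  ["Material Name", "Material", "Material Type", "Shell Material",
   "Fabric", "Body Fabric", "Main Material"]

-- ===== PORT A =====
-- first loop: for c in priority: if c in columns: v = str(row.get(c,"")).strip(); if valid: return v
def pvA_loop1 (row : List (String × String)) (columns : List String) : List String → Option String
  | [] => none
  | c :: rest =>
    if columns.contains c then
      let v := PySem.Str.strip ((PySem.Dict.mk row).getD c "")
      if v ≠ "" ∧ PySem.Str.lower v ≠ "nan" ∧ PySem.Str.lower v ≠ "none" then some v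
      else pvA_loop1 row columns rest
    else pvA_loop1 row columns rest

-- second loop: for c in columns: if "material" in c.lower(): …same check…
def pvA_loop2 (row : List (String × String)) : List String → Option String
  | [] => none
  | c :: rest =>
    if PySem.Str.isIn "material" (PySem.Str.lower c) then
      let v := PySem.Str.strip ((PySem.Dict.mk row).getD c "")
      if v ≠ "" ∧ PySem.Str.lower v ≠ "nan" ∧ PySem.Str.lower v ≠ "none" then some v
      else pvA_loop2 row rest
    else pvA_loop2 row rest

def infer_material_from_row_py (row : List (String × String)) (columns : List String) : String :=
  match pvA_loop1 row columns pvPriority with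
  | some v => v
  | none =>
    match pvA_loop2 row columns with
    | some v => v
    | none => "N/A"

-- ===== PORT B =====
-- _valid: strip, reject empty/'nan'/'none', else return the stripped value
def pvValid (value : String) : Option String :=
  let v := PySem.Str.strip value
  if v ≠ "" ∧ PySem.Str.lower v ≠ "nan" ∧ PySem.Str.lower v ≠ "none" then some v else none

def infer_material_from_row_py_alt (row : List (String × String)) (columns : List String) : String :=
  let scored : List (Int × String) :=
    (PySem.List.enumerate pvPriority 0).filter (fun p => columns.contains p.2)
      ++ ((PySem.List.enumerate columns 0).filter
            (fun p => PySem.Str.isIn "material" (PySem.Str.lower p.2))).map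
           (fun p => ((pvPriority.length : Int) + p.1, p.2))
  let valid : List (Int × String) :=
    scored.filterMap (fun p => (pvValid ((PySem.Dict.mk row).getD p.2 "")).map (fun v => (p.1, v)))
  match PySem.List.min2? valid (fun p => p.1) (fun p => p.2) with
  | some p => p.2
  | none => "N/A"

-- ===== PRECONDITION & SPEC =====
def Spec_infer_material_from_row_py (row : List (String × String)) (columns : List String) (out : String) : Prop := out = infer_material_from_row_py_alt row columns
instance (row : List (String × String)) (columns : List String) (out : String) : Decidable (Spec_infer_material_from_row_py row columns out) := by unfold Spec_infer_material_from_row_py; infer_instance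

-- ===== CLAIM (what is proved, stated in full; the proofs are below) =====
def Claim_equal_infer_material_from_row_py : Prop := ∀ (row : List (String × String)) (columns : List String), Dom_infer_material_from_row_py row columns → Spec_infer_material_from_row_py row columns (infer_material_from_row_py row columns)

-- ===== LEMMAS AND PROOFS =====

-- A's loops are findSome? over the corresponding filtered column lists
theorem pvA_loop1_eq (row : List (String × String)) (columns : List String) :
    ∀ ps : List String,
      pvA_loop1 row columns ps
        = (ps.filter (fun c => columns.contains c)).findSome?
            (fun c => pvValid ((PySem.Dict.mk row).getD c "")) := by
  intro ps
  induction ps with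
  | nil => rfl
  | cons c rest ih =>
    simp only [pvA_loop1, List.filter_cons]
    cases hc : columns.contains c
    case false => simp [ih]
    case true =>
      simp only [if_pos, List.findSome?_cons, pvValid]
      split_ifs with hv
      · rfl
      · exact ih

theorem pvA_loop2_eq (row : List (String × String)) :
    ∀ cs : List String,
      pvA_loop2 row cs
        = (cs.filter (fun c => PySem.Str.isIn "material" (PySem.Str.lower c))).findSome?
            (fun c => pvValid ((PySem.Dict.mk row).getD c "")) := by
  intro cs
  induction cs with
  | nil => rfl
  | cons c rest ih =>
    simp only [pvA_loop2, List.filter_cons]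
    cases hc : PySem.Str.isIn "material" (PySem.Str.lower c)
    case false => simp [ih]
    case true =>
      simp only [if_pos, List.findSome?_cons, pvValid]
      split_ifs with hv
      · rfl
      · exact ih

-- min() of a list whose first components are strictly increasing is its head
theorem pv_min2_cons_skip :
    ∀ (t : List (Int × String)) (m : Int × String), (∀ x ∈ t, m.1 < x.1) →
      PySem.List.min2? (m :: t) (fun p => p.1) (fun p => p.2) = some m := by
  intro t
  induction t with
  | nil => intro m _; rfl
  | cons x rest ih =>
    intro m hm
    have hx : m.1 < x.1 := hm x (by simp)
    have hstep : PySem.List.min2? (m :: x :: rest) (fun p : Int × String => p.1) (fun p => p.2)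
        = PySem.List.min2? (m :: rest) (fun p => p.1) (fun p => p.2) := by
      simp only [PySem.List.min2?, List.foldl_cons]
      have h1 : decide (x.1 < m.1) = false := by simp; omega
      have h2 : decide (m.1 < x.1) = true := by simp [hx]
      simp [h1, h2]
    rw [hstep]
    exact ih m (fun y hy => hm y (by simp [hy]))

theorem pv_min2_head (l : List (Int × String))
    (h : l.Pairwise (fun a b => a.1 < b.1)) :
    PySem.List.min2? l (fun p => p.1) (fun p => p.2) = l.head? := by
  cases l with
  | nil => rfl
  | cons m t => exact pv_min2_cons_skip t m (List.pairwise_cons.mp h).1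

-- head of the (rank, value) list projects to findSome? over the column names
theorem pv_valid_head (f : String → Option String) :
    ∀ scored : List (Int × String),
      ((scored.filterMap (fun p => (f p.2).map (fun v => (p.1, v)))).head?).map (fun p => p.2)
        = (scored.map (fun p => p.2)).findSome? f := by
  intro scored
  induction scored with
  | nil => rfl
  | cons p t ih =>
    simp only [List.filterMap_cons, List.map_cons, List.findSome?_cons]
    cases hfp : f p.2 with
    | none => simpa using ih
    | some v => simp

-- filterMap keeps the first components, hence preserves strict increase of ranks
theorem pv_pairwise_filterMap (f : String → Option String)
    (scored : List (Int × String))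
    (h : scored.Pairwise (fun a b => a.1 < b.1)) :
    (scored.filterMap (fun p => (f p.2).map (fun v => (p.1, v)))).Pairwise
      (fun a b => a.1 < b.1) := by
  rw [List.pairwise_filterMap]
  refine h.imp_of_mem ?_
  intro a b _ _ hab x hx y hy
  cases hfa : f a.2 with
  | none => rw [hfa] at hx; simp at hx
  | some v =>
    rw [hfa] at hx; simp at hx; subst hx
    cases hfb : f b.2 with
    | none => rw [hfb] at hy; simp at hy
    | some w =>
      rw [hfb] at hy; simp at hy; subst hy
      simpa using hab

-- map snd through a filter of enumerate is the plain filter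
theorem pv_map_snd_filter_enumerate (q : String → Bool) :
    ∀ (xs : List String) (s : Int),
      (((PySem.List.enumerate xs s).filter (fun p => q p.2)).map (fun p => p.2)) = xs.filter q := by
  intro xs
  induction xs with
  | nil => intro s; rfl
  | cons x t ih =>
    intro s
    simp only [PySem.List.enumerate_cons, List.filter_cons]
    cases hq : q x <;> simp [ih (s + 1)]

-- the scored candidate list has strictly increasing ranks
theorem pv_pairwise_scored (columns : List String) :
    ((PySem.List.enumerate pvPriority 0).filter (fun p => columns.contains p.2)
      ++ ((PySem.List.enumerate columns 0).filter
            (fun p => PySem.Str.isIn "material" (PySem.Str.lower p.2))).map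
           (fun p => ((pvPriority.length : Int) + p.1, p.2))).Pairwise
      (fun a b => a.1 < b.1) := by
  rw [List.pairwise_append]
  refine ⟨(PySem.List.pairwise_lt_enumerate pvPriority 0).filter _, ?_, ?_⟩
  · rw [List.pairwise_map]
    refine ((PySem.List.pairwise_lt_enumerate columns 0).filter _).imp ?_
    intro a b hab
    simpa using hab
  · intro a ha b hb
    have ha' := List.mem_of_mem_filter ha
    rw [PySem.List.mem_enumerate_iff] at ha'
    obtain ⟨k, hk, rfl⟩ := ha'
    simp only [List.mem_map] at hb
    obtain ⟨p, hp, rfl⟩ := hb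
    have hp' := List.mem_of_mem_filter hp
    rw [PySem.List.mem_enumerate_iff] at hp'
    obtain ⟨j, hj, rfl⟩ := hp'
    have hk7 : k < 7 := by simpa [pvPriority] using hk
    simp only [pvPriority, List.length_cons, List.length_nil]
    omega

-- ===== VERDICT (by name: the statement is the Claim_ definition above) =====
theorem pv_alt_reduce (f : String → Option String) (scored : List (Int × String))
    (hp : scored.Pairwise (fun a b => a.1 < b.1)) :
    (match PySem.List.min2?
        (scored.filterMap (fun p => (f p.2).map (fun v => (p.1, v))))
        (fun p => p.1) (fun p => p.2) with
     | some p => p.2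
     | none => "N/A")
      = (match (scored.map (fun p => p.2)).findSome? f with
         | some v => v
         | none => "N/A") := by
  rw [pv_min2_head _ (pv_pairwise_filterMap f scored hp)]
  have hhead := pv_valid_head f scored
  cases hh : (scored.filterMap (fun p => (f p.2).map (fun v => (p.1, v)))).head? with
  | none => rw [hh] at hhead; cases h2 : (scored.map (fun p => p.2)).findSome? f with
    | none => rfl
    | some v => rw [h2] at hhead; simp at hhead
  | some p =>
    rw [hh] at hhead
    cases h2 : (scored.map (fun p => p.2)).findSome? f with
    | none => rw [h2] at hhead; simp at hhead
    | some v => rw [h2] at hhead; simp at hhead; simpa using hhead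

theorem infer_material_from_row_py_spec : Claim_equal_infer_material_from_row_py := by
  intro row columns _
  unfold Spec_infer_material_from_row_py infer_material_from_row_py
  simp only [infer_material_from_row_py_alt]
  rw [pvA_loop1_eq, pvA_loop2_eq,
      pv_alt_reduce (fun c => pvValid ((PySem.Dict.mk row).getD c "")) _ (pv_pairwise_scored columns)]
  rw [List.map_append, List.map_map]
  have hcomp : ((fun p => p.2) ∘ fun p : Int × String => ((pvPriority.length : Int) + p.1, p.2))
      = (fun p : Int × String => p.2) := rfl
  rw [hcomp, pv_map_snd_filter_enumerate (fun c => columns.contains c),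
      pv_map_snd_filter_enumerate (fun c => PySem.Str.isIn "material" (PySem.Str.lower c)),
      List.findSome?_append]
  cases h1 : (List.filter (fun c => columns.contains c) pvPriority).findSome?
      (fun c => pvValid ((PySem.Dict.mk row).getD c "")) with
  | some v => simp
  | none => simp
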